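-- pv_equiv track=rewrite | github.com/utajum/gmail-notifier | gmail_notifier/email_utils.py | find_thread_email_ids
-- ===== SOURCE A (Python) =====
-- def find_thread_email_ids(emails, email_id):
--     """Find all email IDs belonging to the same thread as the given email.
--
--     Args:
--         emails: List of all email dicts.
--         email_id: ID of an email in the thread.
--
--     Returns:
--         list: List of email ID strings in the same thread.
--     """
--     # Find the thread_id for this email
--     thread_id = None
--     for e in emails:
--         if str(e.get("id")) == str(email_id):
--             thread_id = e.get("thread_id")
--             break
--
--     # Get all email IDs in this thread
--     if thread_id:
--         return [str(e.get("id")) for e in emails if e.get("thread_id") == thread_id]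
--     else:
--         # No thread_id, just return the single email
--         return [str(email_id)]
-- ===== SOURCE B (Python) =====
-- def find_thread_email_ids(emails, email_id):
--     """Find all email IDs belonging to the same thread as the given email.
--
--     One pass: group ids by thread_id and record each id's first thread_id,
--     then answer the query from the two indexes.
--     """
--     groups = {}
--     first = {}
--     for e in emails:
--         sid = str(e.get("id"))
--         tid = e.get("thread_id")
--         first.setdefault(sid, tid)
--         groups.setdefault(tid, []).append(sid)
--     thread_id = first.get(str(email_id))
--     if thread_id:
--         return groups.get(thread_id, [])
--     return [str(email_id)]
-- ===== Notes on version B (the rewrite author's own statement) =====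
-- stated objective: alternative
-- what changed: B replaces A's scan-for-thread-id followed by a second filtering pass with a single pass that builds two indexes (thread_id -> ids via setdefault/append, id -> first thread_id via setdefault) and answers the query by two dict lookups.
import Mathlib
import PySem

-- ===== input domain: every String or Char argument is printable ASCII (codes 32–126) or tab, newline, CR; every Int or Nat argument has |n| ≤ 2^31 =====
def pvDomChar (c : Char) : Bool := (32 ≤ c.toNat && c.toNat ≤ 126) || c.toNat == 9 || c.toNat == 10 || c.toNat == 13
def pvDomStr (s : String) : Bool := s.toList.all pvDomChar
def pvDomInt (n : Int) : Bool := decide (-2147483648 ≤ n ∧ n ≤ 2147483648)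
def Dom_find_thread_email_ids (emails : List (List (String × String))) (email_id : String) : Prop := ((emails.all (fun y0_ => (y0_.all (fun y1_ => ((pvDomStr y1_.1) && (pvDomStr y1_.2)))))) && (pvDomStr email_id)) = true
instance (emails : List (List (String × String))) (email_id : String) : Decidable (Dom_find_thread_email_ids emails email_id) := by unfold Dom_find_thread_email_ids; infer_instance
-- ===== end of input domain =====

-- B builds two dict indexes in one pass instead of A's find-then-filter two-pass scan (objective: alternative; return-value equivalence).

-- shared Python primitives: e.get(k) and str(x) for x an Optional[str]
def dget (e : List (String × String)) (k : String) : Option String := (PySem.Dict.mk e).get? k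
def pyStr (o : Option String) : String := match o with | some s => s | none => "None"

-- ===== PORT A =====
-- the first loop of A: scan for the first e with str(e.get("id")) == str(email_id), thread_id = None if no match
def aLoop (emails : List (List (String × String))) (email_id : String) : Option String :=
  match emails with
  | [] => none
  | e :: rest => if pyStr (dget e "id") = email_id then dget e "thread_id" else aLoop rest email_id

def find_thread_email_ids (emails : List (List (String × String))) (email_id : String) : List String :=
  match aLoop emails email_id with
  | some s =>
      if s = "" then [email_id]   -- falsy thread_id ""
      else (emails.filter (fun e => dget e "thread_id" == some s)).map (fun e => pyStr (dget e "id"))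
  | none => [email_id]

-- ===== PORT B =====
-- one pass building (groups, first); then two lookups
def bIndexes (emails : List (List (String × String))) :
    PySem.Dict (Option String) (List String) × PySem.Dict String (Option String) :=
  emails.foldl
    (fun st e =>
      (st.1.modify (dget e "thread_id") [] (· ++ [pyStr (dget e "id")]),
       st.2.setdefault (pyStr (dget e "id")) (dget e "thread_id")))
    (PySem.Dict.empty, PySem.Dict.empty)

def find_thread_email_ids_alt (emails : List (List (String × String))) (email_id : String) : List String :=
  match (bIndexes emails).2.get? email_id with
  | some (some s) => if s = "" then [email_id] else (bIndexes emails).1.getD (some s) []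
  | some none => [email_id]
  | none => [email_id]

-- ===== PRECONDITION & SPEC =====
def Spec_find_thread_email_ids (emails : List (List (String × String))) (email_id : String) (out : List String) : Prop := out = find_thread_email_ids_alt emails email_id
instance (emails : List (List (String × String))) (email_id : String) (out : List String) : Decidable (Spec_find_thread_email_ids emails email_id out) := by unfold Spec_find_thread_email_ids; infer_instance

-- ===== CLAIM (what is proved, stated in full; the proofs are below) =====
def Claim_equal_find_thread_email_ids : Prop := ∀ (emails : List (List (String × String))) (email_id : String), Dom_find_thread_email_ids emails email_id → Spec_find_thread_email_ids emails email_id (find_thread_email_ids emails email_id)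

-- ===== LEMMAS AND PROOFS =====

-- the pair fold splits into two independent folds
theorem foldl_pair {α β γ : Type} (l : List γ) (f : α → γ → α) (g : β → γ → β) (a : α) (b : β) :
    l.foldl (fun st e => (f st.1 e, g st.2 e)) (a, b) = (l.foldl f a, l.foldl g b) := by
  induction l generalizing a b with
  | nil => rfl
  | cons e rest ih => simp [List.foldl_cons, ih]

-- first-occurrence scan, as a first-match Option (proof helper)
def aScan (emails : List (List (String × String))) (q : String) : Option (Option String) :=
  match emails with
  | [] => none
  | e :: rest => if pyStr (dget e "id") = q then some (dget e "thread_id") else aScan rest q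

theorem aLoop_eq_aScan (emails : List (List (String × String))) (q : String) :
    aLoop emails q = (aScan emails q).getD none := by
  induction emails with
  | nil => rfl
  | cons e rest ih => simp only [aLoop, aScan]; split_ifs <;> simp [ih]

-- the setdefault fold looks up as: existing binding, else first occurrence in the list
theorem firstFold_get? (l : List (List (String × String))) (f : PySem.Dict String (Option String)) (q : String) :
    (l.foldl (fun f e => f.setdefault (pyStr (dget e "id")) (dget e "thread_id")) f).get? q
      = match f.get? q with
        | some v => some v
        | none => aScan l q := by
  induction l generalizing f with
  | nil => simp only [List.foldl_nil]; cases f.get? q <;> rfl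
  | cons e rest ih =>
    simp only [List.foldl_cons, ih, aScan]
    by_cases h : q = pyStr (dget e "id")
    · subst h
      rw [PySem.Dict.get?_setdefault_self]
      cases f.get? (pyStr (dget e "id")) <;> simp
    · rw [PySem.Dict.get?_setdefault_of_ne _ _ h]
      rw [if_neg (fun h2 => h h2.symm)]

-- bIndexes splits into its two component folds
theorem bIndexes_eq (emails : List (List (String × String))) :
    bIndexes emails =
      (emails.foldl (fun d e => d.modify (dget e "thread_id") [] (· ++ [pyStr (dget e "id")])) PySem.Dict.empty,
       emails.foldl (fun f e => f.setdefault (pyStr (dget e "id")) (dget e "thread_id")) PySem.Dict.empty) := by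
  exact foldl_pair emails
    (fun d e => d.modify (dget e "thread_id") [] (· ++ [pyStr (dget e "id")]))
    (fun f e => f.setdefault (pyStr (dget e "id")) (dget e "thread_id"))
    PySem.Dict.empty PySem.Dict.empty

-- the grouping fold looks up as A's comprehension
theorem groupFold_getD (emails : List (List (String × String))) (c : Option String) :
    ((emails.foldl (fun d e => d.modify (dget e "thread_id") [] (· ++ [pyStr (dget e "id")]))
        (PySem.Dict.empty : PySem.Dict (Option String) (List String))).getD c [])
      = (emails.filter (fun e => dget e "thread_id" == c)).map (fun e => pyStr (dget e "id")) := by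
  have h := PySem.Dict.getD_foldl_modify_append
      (emails.map (fun e => (dget e "thread_id", pyStr (dget e "id"))))
      (PySem.Dict.empty : PySem.Dict (Option String) (List String)) c
  rw [List.foldl_map] at h
  simp only [PySem.Dict.getD_empty, List.nil_append] at h
  rw [h, List.filter_map, List.map_map]
  rfl

-- ===== VERDICT (by name: the statement is the Claim_ definition above) =====
theorem find_thread_email_ids_spec : Claim_equal_find_thread_email_ids := by
  intro emails email_id _
  unfold Spec_find_thread_email_ids find_thread_email_ids find_thread_email_ids_alt
  rw [bIndexes_eq]

  simp only [firstFold_get?, PySem.Dict.get?_empty, aLoop_eq_aScan]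
  cases hs : aScan emails email_id with
  | none => rfl
  | some tid =>
    cases tid with
    | none => rfl
    | some s =>
      simp only [Option.getD_some]
      split_ifs with h
      · rfl
      · exact (groupFold_getD emails (some s)).symm
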